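-- pv_equiv track=rewrite | github.com/mjaseem/qc-exercises | battleship.py | valid_pos
-- ===== SOURCE A (Python) =====
-- def valid_pos(input_pos):
--     used = set()
--     if len(input_pos) != 3:
--         return False
--     for i in input_pos:
--         if i > 4 or i < 0:
--             return False  # should be within 0-4
--         if i in used:
--             return False  # check uniqueness
--         used.add(i)
--     return True
-- ===== SOURCE B (Python) =====
-- def valid_pos(input_pos):
--     if len(input_pos) != 3:
--         return False
--     a, b, c = sorted(input_pos)
--     return 0 <= a and a < b and b < c and c <= 4
-- ===== Notes on version B (the rewrite author's own statement) =====
-- stated objective: alternative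
-- what changed: Replaces A's single pass with an incrementally maintained membership set and three early returns by sort-then-scan: sort the three values and check the strictly increasing chain 0 <= a < b < c <= 4, which gives uniqueness and range in one comparison chain.
import Mathlib
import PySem

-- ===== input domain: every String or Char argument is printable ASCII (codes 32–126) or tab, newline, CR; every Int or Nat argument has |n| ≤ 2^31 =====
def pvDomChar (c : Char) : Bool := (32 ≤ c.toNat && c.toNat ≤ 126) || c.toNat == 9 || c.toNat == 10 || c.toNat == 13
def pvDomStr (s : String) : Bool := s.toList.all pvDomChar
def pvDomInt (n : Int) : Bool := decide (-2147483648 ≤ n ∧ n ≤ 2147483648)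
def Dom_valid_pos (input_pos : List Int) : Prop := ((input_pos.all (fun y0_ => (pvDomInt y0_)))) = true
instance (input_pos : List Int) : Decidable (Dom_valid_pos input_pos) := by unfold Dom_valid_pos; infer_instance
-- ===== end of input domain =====

-- B replaces A's single-pass loop (membership set + early returns) by sort-then-scan:
-- sort the three values and check the strictly increasing chain 0 <= a < b < c <= 4.

-- ===== PORT A =====
-- the 'for i in input_pos' loop carrying the 'used' set
def validPosLoop : List Int → PySem.Set Int → Bool
  | [], _ => true
  | i :: rest, used =>
    if i > 4 || i < 0 then false
    else if PySem.Set.contains used i then false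
    else validPosLoop rest (PySem.Set.add used i)

def valid_pos (input_pos : List Int) : Bool :=
  if input_pos.length ≠ 3 then false
  else validPosLoop input_pos PySem.Set.empty

-- ===== PORT B =====
-- 'a, b, c = sorted(input_pos)': the guard ensures the sorted list has length 3,
-- so the wildcard branch of the match is unreachable
def valid_pos_alt (input_pos : List Int) : Bool :=
  if input_pos.length ≠ 3 then false
  else
    match PySem.List.sorted input_pos (fun x => x) false with
    | [a, b, c] => decide (0 ≤ a) && decide (a < b) && decide (b < c) && decide (c ≤ 4)
    | _ => false

-- ===== PRECONDITION & SPEC =====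
def Spec_valid_pos (input_pos : List Int) (out : Bool) : Prop := out = valid_pos_alt input_pos
instance (input_pos : List Int) (out : Bool) : Decidable (Spec_valid_pos input_pos out) := by unfold Spec_valid_pos; infer_instance

-- ===== CLAIM (what is proved, stated in full; the proofs are below) =====
def Claim_equal_valid_pos : Prop := ∀ (input_pos : List Int), Dom_valid_pos input_pos → Spec_valid_pos input_pos (valid_pos input_pos)

-- ===== LEMMAS AND PROOFS =====

-- ===== VERDICT (by name: the statement is the Claim_ definition above) =====
theorem valid_pos_eq (xs : List Int) : valid_pos xs = valid_pos_alt xs := by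
  unfold valid_pos valid_pos_alt
  by_cases h3 : xs.length = 3
  · match xs, h3 with
    | [x, y, z], _ =>
      simp only [PySem.List.sorted, PySem.List.insertBy, validPosLoop,
        PySem.Set.empty, PySem.Set.add, PySem.Set.contains, List.foldl]
      split_ifs <;>
        simp only [PySem.List.insertBy] <;>
        split_ifs <;> simp_all <;> omega
  · simp [h3]

-- ===== VERDICT (by name: the statement is the Claim_ definition above) =====
theorem valid_pos_spec : Claim_equal_valid_pos := by
  intro xs _
  exact valid_pos_eq xs
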